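-- pv_equiv track=rewrite | github.com/rhythm-semwal/DS-Algo | Tries/prefix and suffix.py | check
-- ===== SOURCE A (Python) =====
-- def check(word, m):
--     n = len(word)
--     if n < m:
--         return False
--     if n == m:
--         return True
--
--     word1, word2 = "", ""
--
--     for i in range(m):
--         word1 += word[i]
--     for i in range(n-m, n):
--         word2 += word[i]
--
--     return word1 == word2
-- ===== SOURCE B (Python) =====
-- def check(word, m):
--     n = len(word)
--     if n < m:
--         return False
--     if n == m:
--         return True
--     for i in range(m):
--         if word[i] != word[n - m + i]:
--             return False
--     return True
-- ===== Notes on version B (the rewrite author's own statement) =====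
-- stated objective: faster
-- what changed: Replaced the two substring-building loops plus a final string compare with a single short-circuiting index pass comparing word[i] with word[n-m+i] directly, building no intermediate strings.
import Mathlib
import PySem

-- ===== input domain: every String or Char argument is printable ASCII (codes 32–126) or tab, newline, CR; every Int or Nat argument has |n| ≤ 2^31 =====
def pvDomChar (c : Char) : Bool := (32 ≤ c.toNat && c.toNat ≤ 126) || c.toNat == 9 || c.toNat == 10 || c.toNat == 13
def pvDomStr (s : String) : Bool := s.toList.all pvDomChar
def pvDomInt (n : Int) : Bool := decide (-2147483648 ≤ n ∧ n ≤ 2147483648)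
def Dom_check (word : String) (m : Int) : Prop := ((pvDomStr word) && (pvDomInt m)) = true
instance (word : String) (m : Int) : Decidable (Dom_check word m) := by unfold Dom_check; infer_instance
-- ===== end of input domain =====

-- B replaces A's two substring-building loops plus string compare with one short-circuiting
-- pass comparing word[i] to word[n-m+i] directly (objective: simpler).

-- ===== PORT A =====
-- word[i] is always in range wherever these loops run (0 ≤ i < m < n and n-m ≤ i < n with
-- 0 < m), so pyGetD with a dummy default is exact here.
def check (word : String) (m : Int) : Bool :=
  let cs := word.toList
  let n : Int := PySem.Str.len word
  if n < m then false
  else if n = m then true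
  else
    let word1 := (PySem.List.pyRange 0 m 1).foldl
      (fun acc i => acc ++ [PySem.List.pyGetD cs i ' ']) ([] : List Char)
    let word2 := (PySem.List.pyRange (n - m) n 1).foldl
      (fun acc i => acc ++ [PySem.List.pyGetD cs i ' ']) ([] : List Char)
    word1 == word2

-- ===== PORT B =====
def check_alt (word : String) (m : Int) : Bool :=
  let cs := word.toList
  let n : Int := PySem.Str.len word
  if n < m then false
  else if n = m then true
  else
    (PySem.List.pyRange 0 m 1).all
      (fun i => PySem.List.pyGetD cs i ' ' == PySem.List.pyGetD cs (n - m + i) ' ')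

-- ===== PRECONDITION & SPEC =====
def Spec_check (word : String) (m : Int) (out : Bool) : Prop := out = check_alt word m
instance (word : String) (m : Int) (out : Bool) : Decidable (Spec_check word m out) := by unfold Spec_check; infer_instance

-- ===== CLAIM (what is proved, stated in full; the proofs are below) =====
def Claim_equal_check : Prop := ∀ (word : String) (m : Int), Dom_check word m → Spec_check word m (check word m)

-- ===== LEMMAS AND PROOFS =====

-- A's string-building loop is a map over the range.
theorem pv_foldl_snoc {α β : Type} (f : α → β) :
    ∀ (l : List α) (init : List β),
      l.foldl (fun acc i => acc ++ [f i]) init = init ++ l.map f := by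
  intro l
  induction l with
  | nil => intro init; simp
  | cons a t ih => intro init; simp [List.foldl_cons, ih]

theorem pv_map_eq_map {α β : Type} (F G : α → β) :
    ∀ l : List α, (l.map F = l.map G) ↔ ∀ x ∈ l, F x = G x := by
  intro l
  induction l with
  | nil => simp
  | cons a t ih => simp [ih]

-- ===== VERDICT (by name: the statement is the Claim_ definition above) =====
theorem check_spec : Claim_equal_check := by
  intro word m _
  unfold Spec_check check check_alt
  simp only []
  split_ifs with h1 h2
  · rfl
  · rfl
  · rw [pv_foldl_snoc, pv_foldl_snoc]
    have hmm : PySem.Str.len word - (PySem.Str.len word - m) = m := by ring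
    rw [PySem.List.pyRange_one, PySem.List.pyRange_one, hmm]
    simp only [sub_zero]
    simp only [List.nil_append, List.map_map, List.all_map]
    rw [Bool.eq_iff_iff]
    simp only [beq_iff_eq, List.all_eq_true, Function.comp]
    rw [pv_map_eq_map]
    constructor
    · intro h k hk
      simpa using h k hk
    · intro h k hk
      simpa using h k hk
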